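-- pv_equiv track=rewrite | github.com/Kabir1240/Python | playground.py | compute_rank
-- ===== SOURCE A (Python) =====
-- def compute_rank(bwt_string: str):
--     n = len(bwt_string)
--     string_sorted = sorted(bwt_string)
--     rank = [None] * 91
--     counter = [0] * 91
--     n_occurrence = [[0] * n for _ in range(91)]
--     for i in range(n):
--         index = ord(string_sorted[i]) - 36
--         if rank[index] is None:
--             rank[index] = i
--
--         index = ord(bwt_string[i]) - 36
--         counter[index] += 1
--         n_occurrence[index][i] = counter[index]
--
--     return n_occurrence, rank
-- ===== SOURCE B (Python) =====
-- def compute_rank(bwt_string: str):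
--     n = len(bwt_string)
--     rank = [None] * 91
--     total = 0
--     for ch in sorted(set(bwt_string)):
--         index = ord(ch) - 36
--         if rank[index] is None:
--             rank[index] = total
--         total += bwt_string.count(ch)
--     counter = [0] * 91
--     n_occurrence = [[0] * n for _ in range(91)]
--     for i, ch in enumerate(bwt_string):
--         index = ord(ch) - 36
--         counter[index] += 1
--         n_occurrence[index][i] = counter[index]
--     return n_occurrence, rank
-- ===== Notes on version B (the rewrite author's own statement) =====
-- stated objective: alternative
-- what changed: B computes rank by a cumulative prefix-sum walk over the sorted distinct characters (counting occurrences) instead of A's sort-the-whole-string-then-first-occurrence scan, and builds counter/n_occurrence in a separate enumerate loop instead of A's single fused index loop.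
import Mathlib
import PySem

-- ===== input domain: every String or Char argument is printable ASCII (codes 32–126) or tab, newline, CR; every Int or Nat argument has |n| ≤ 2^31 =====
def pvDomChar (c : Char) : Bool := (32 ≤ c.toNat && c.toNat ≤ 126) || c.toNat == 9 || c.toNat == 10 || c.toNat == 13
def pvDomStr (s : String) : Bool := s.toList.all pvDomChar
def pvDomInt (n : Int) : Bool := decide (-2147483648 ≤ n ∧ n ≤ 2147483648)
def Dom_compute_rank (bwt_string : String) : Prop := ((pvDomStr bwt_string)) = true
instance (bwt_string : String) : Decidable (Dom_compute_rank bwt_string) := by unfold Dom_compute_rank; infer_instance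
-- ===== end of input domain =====

-- B replaces A's sort-the-whole-string-then-scan rank computation by a counting/prefix-sum walk over
-- the sorted distinct characters (same return value; same cost class — 'alternative', not claimed faster).

-- ===== PORT A =====
-- literal transliteration of Source A: one loop over range(n) updating rank (via the sorted string),
-- counter and n_occurrence (via the original string); negative indexes wrap as in Python (pyGetD/pySetD).
def compute_rank (bwt_string : String) : List (List Int) × List (Option Int) :=
  let cs := bwt_string.toList
  let n : Nat := cs.length
  let string_sorted := PySem.List.sorted cs (fun c => c)
  let st := (PySem.List.pyRange 0 (n : Int) 1).foldl
    (fun (st : List (Option Int) × (List Int × List (List Int))) (i : Int) =>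
      let index1 : Int := ((PySem.List.pyGetD string_sorted i ' ').toNat : Int) - 36
      let rank' := if PySem.List.pyGetD st.1 index1 none = none
                   then PySem.List.pySetD st.1 index1 (some i) else st.1
      let index2 : Int := ((PySem.List.pyGetD cs i ' ').toNat : Int) - 36
      let c := PySem.List.pyGetD st.2.1 index2 0 + 1
      let counter' := PySem.List.pySetD st.2.1 index2 c
      let n_occurrence' := PySem.List.pySetD st.2.2 index2
          (PySem.List.pySetD (PySem.List.pyGetD st.2.2 index2 []) i c)
      (rank', counter', n_occurrence'))
    (List.replicate 91 (none : Option Int),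
     List.replicate 91 (0 : Int), List.replicate 91 (List.replicate n (0 : Int)))
  (st.2.2, st.1)

-- ===== PORT B =====
-- literal transliteration of Source B: rank by cumulative counts over sorted(set(bwt_string)),
-- then the counter/n_occurrence loop over enumerate(bwt_string).
def compute_rank_alt (bwt_string : String) : List (List Int) × List (Option Int) :=
  let cs := bwt_string.toList
  let n : Nat := cs.length
  let rt := (PySem.List.sorted (PySem.Set.ofList cs) (fun c => c)).foldl
    (fun (rt : List (Option Int) × Int) ch =>
      let index : Int := (ch.toNat : Int) - 36
      let rank' := if PySem.List.pyGetD rt.1 index none = none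
                   then PySem.List.pySetD rt.1 index (some rt.2) else rt.1
      (rank', rt.2 + (PySem.List.count cs ch : Int)))
    (List.replicate 91 (none : Option Int), 0)
  let co := (PySem.List.enumerate cs).foldl
    (fun (co : List Int × List (List Int)) (p : Int × Char) =>
      let index : Int := (p.2.toNat : Int) - 36
      let c := PySem.List.pyGetD co.1 index 0 + 1
      (PySem.List.pySetD co.1 index c,
       PySem.List.pySetD co.2 index (PySem.List.pySetD (PySem.List.pyGetD co.2 index []) p.1 c)))
    (List.replicate 91 (0 : Int), List.replicate 91 (List.replicate n (0 : Int)))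
  (co.2, rt.1)

-- ===== PRECONDITION & SPEC =====
def Spec_compute_rank (bwt_string : String) (out : List (List Int) × List (Option Int)) : Prop := out = compute_rank_alt bwt_string
instance (bwt_string : String) (out : List (List Int) × List (Option Int)) : Decidable (Spec_compute_rank bwt_string out) := by unfold Spec_compute_rank; infer_instance

-- ===== CLAIM (what is proved, stated in full; the proofs are below) =====
def Claim_equal_compute_rank : Prop := ∀ (bwt_string : String), Dom_compute_rank bwt_string → Spec_compute_rank bwt_string (compute_rank bwt_string)

-- ===== LEMMAS AND PROOFS =====

-- proof-only helpers naming the loop bodies of the two ports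
def pvIdxC (ch : Char) : Int := (ch.toNat : Int) - 36

def pvCondSet (r : List (Option Int)) (ch : Char) (v : Int) : List (Option Int) :=
  if PySem.List.pyGetD r (pvIdxC ch) none = none then PySem.List.pySetD r (pvIdxC ch) (some v) else r

def pvRStep (r : List (Option Int)) (p : Int × Char) : List (Option Int) := pvCondSet r p.2 p.1

def pvCOStep (co : List Int × List (List Int)) (p : Int × Char) : List Int × List (List Int) :=
  let c := PySem.List.pyGetD co.1 (pvIdxC p.2) 0 + 1
  (PySem.List.pySetD co.1 (pvIdxC p.2) c,
   PySem.List.pySetD co.2 (pvIdxC p.2) (PySem.List.pySetD (PySem.List.pyGetD co.2 (pvIdxC p.2) []) p.1 c))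

def pvBStep (cnt : Char → Int) (rt : List (Option Int) × Int) (ch : Char) : List (Option Int) × Int :=
  (pvCondSet rt.1 ch rt.2, rt.2 + cnt ch)

-- xs[i] after xs[i] = v is v, for any in-range (possibly negative) Python index
lemma pvGetSet {α : Type} (r : List α) (i : Int) (v d : α)
    (hlo : -(r.length : Int) ≤ i) (hhi : i < (r.length : Int)) :
    PySem.List.pyGetD (PySem.List.pySetD r i v) i d = v := by
  obtain ⟨k, hk1, hk2⟩ : ∃ k : Nat, PySem.List.pyIdx? r.length i = some k ∧ k < r.length := by
    unfold PySem.List.pyIdx?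
    by_cases h : 0 ≤ i
    · exact ⟨i.toNat, by rw [if_pos h, if_pos hhi], by omega⟩
    · exact ⟨r.length - (-i).toNat, by rw [if_neg h, if_pos (by omega)], by omega⟩
  have hset : PySem.List.pySetD r i v = r.set k v := by
    unfold PySem.List.pySetD PySem.List.pySet?; rw [hk1]; rfl
  have hidx2 : PySem.List.pyIdx? (r.set k v).length i = some k := by
    rw [List.length_set]; exact hk1
  unfold PySem.List.pyGetD PySem.List.pyGet?
  rw [hset, hidx2]
  simp [List.getElem?_set, hk2]

lemma pvCondSet_length (r : List (Option Int)) (ch : Char) (v : Int) :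
    (pvCondSet r ch v).length = r.length := by
  unfold pvCondSet; split <;> simp [PySem.List.length_pySetD]

lemma pvIdxC_lo (ch : Char) : -(91 : Int) ≤ pvIdxC ch := by
  unfold pvIdxC; omega

lemma pvIdxC_hi (ch : Char) (h : ch.toNat ≤ 126) : pvIdxC ch < 91 := by
  unfold pvIdxC; omega

-- after the first visit rank[idx] is set; further equal characters change nothing
lemma pvFoldRep_id (k : Nat) (c : Char) (s : Int) (r : List (Option Int))
    (h : PySem.List.pyGetD r (pvIdxC c) none ≠ none) :
    (PySem.List.enumerate (List.replicate k c) s).foldl pvRStep r = r := by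
  induction k generalizing s with
  | zero => simp [PySem.List.enumerate_nil]
  | succ k ih =>
      rw [List.replicate_succ, PySem.List.enumerate_cons, List.foldl_cons]
      have hstep : pvRStep r (s, c) = r := by
        unfold pvRStep pvCondSet; rw [if_neg h]
      rw [hstep]; exact ih (s + 1)

-- a nonempty run of equal characters acts as a single conditional set at its first index
lemma pvFoldRep (m : Nat) (hm : 0 < m) (c : Char) (hc : c.toNat ≤ 126) (tot : Int)
    (r : List (Option Int)) (hr : r.length = 91) :
    (PySem.List.enumerate (List.replicate m c) tot).foldl pvRStep r = pvCondSet r c tot := by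
  obtain ⟨m', rfl⟩ : ∃ m', m = m' + 1 := ⟨m - 1, by omega⟩
  rw [List.replicate_succ, PySem.List.enumerate_cons, List.foldl_cons]
  have hstep : pvRStep r (tot, c) = pvCondSet r c tot := rfl
  rw [hstep]
  apply pvFoldRep_id
  by_cases h : PySem.List.pyGetD r (pvIdxC c) none = none
  · unfold pvCondSet; rw [if_pos h]
    rw [pvGetSet r (pvIdxC c) (some tot) none (by rw [hr]; exact pvIdxC_lo c)
        (by rw [hr]; exact_mod_cast pvIdxC_hi c hc)]
    simp
  · unfold pvCondSet; rw [if_neg h]; exact h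

-- a sorted list whose elements are all = c or > c is the run of c's followed by the rest
lemma pvSortedSplit (t : List Char) (c : Char) (hs : List.Pairwise (· ≤ ·) t)
    (hall : ∀ x ∈ t, x = c ∨ c < x) :
    t = List.replicate (List.count c t) c ++ t.filter (fun x => x != c) := by
  induction t with
  | nil => simp
  | cons x t ih =>
      rcases List.pairwise_cons.mp hs with ⟨hx, ht⟩
      rcases hall x List.mem_cons_self with hxc | hxc
      · subst hxc
        have : List.count x (x :: t) = List.count x t + 1 := by simp
        rw [this, List.replicate_succ]
        simp only [List.filter_cons, bne_self_eq_false]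
        exact congrArg (x :: ·) (ih ht (fun y hy => hall y (List.mem_cons_of_mem _ hy)))
      · have hne : ∀ y ∈ x :: t, y ≠ c := by
          intro y hy
          rcases List.mem_cons.mp hy with rfl | hy'
          · exact ne_of_gt hxc
          · exact ne_of_gt (lt_of_lt_of_le hxc (hx y hy'))
        have hcount : List.count c (x :: t) = 0 := by
          rw [List.count_eq_zero]
          intro hmem; exact hne c hmem rfl
        rw [hcount]
        simp only [List.replicate_zero, List.nil_append]
        rw [List.filter_eq_self.mpr]
        intro y hy; simpa using hne y hy

-- main induction: A's first-occurrence scan of the sorted string equals B's prefix-sum walk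
-- over the sorted distinct characters
lemma pvMainL (d : List Char) : ∀ (t : List Char) (cnt : Char → Int) (r : List (Option Int)) (tot : Int),
    List.Pairwise (· < ·) d → List.Pairwise (· ≤ ·) t →
    (∀ x, x ∈ d ↔ x ∈ t) → (∀ x ∈ t, x.toNat ≤ 126) →
    (∀ x ∈ d, cnt x = (List.count x t : Int)) → r.length = 91 →
    (PySem.List.enumerate t tot).foldl pvRStep r = (d.foldl (pvBStep cnt) (r, tot)).1 := by
  induction d with
  | nil =>
      intro t cnt r tot _ _ hmem _ _ _
      have ht : t = [] := by
        cases t with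
        | nil => rfl
        | cons y t => exact absurd ((hmem y).mpr List.mem_cons_self) (by simp)
      subst ht; simp [PySem.List.enumerate_nil]
  | cons c d' ih =>
      intro t cnt r tot hd hts hmem hbound hcnt hr
      rcases List.pairwise_cons.mp hd with ⟨hcd, hd'⟩
      have hct : c ∈ t := (hmem c).mp List.mem_cons_self
      have hall : ∀ x ∈ t, x = c ∨ c < x := by
        intro x hx
        rcases List.mem_cons.mp ((hmem x).mpr hx) with rfl | hx'
        · exact Or.inl rfl
        · exact Or.inr (hcd x hx')
      have hsplit := pvSortedSplit t c hts hall
      set m := List.count c t with hm_def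
      have hm : 0 < m := List.count_pos_iff.mpr hct
      set t' := t.filter (fun x => x != c) with ht'_def
      have hnotc : ∀ x ∈ t', x ≠ c := by
        intro x hx
        have := List.of_mem_filter hx
        simpa using this
      have hcount' : ∀ x, x ≠ c → List.count x t' = List.count x t := by
        intro x hxc
        conv_rhs => rw [hsplit]
        rw [List.count_append, List.count_replicate]
        simp [Ne.symm hxc]
      -- left side
      conv_lhs => rw [hsplit]
      rw [PySem.List.enumerate_append, List.foldl_append]
      rw [pvFoldRep m hm c (hbound c hct) tot r hr]
      -- right side
      rw [List.foldl_cons]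
      have hcntc : cnt c = (m : Int) := hcnt c List.mem_cons_self
      have hstep : pvBStep cnt (r, tot) c = (pvCondSet r c tot, tot + (m : Int)) := by
        unfold pvBStep; rw [hcntc]
      rw [hstep]
      have hlen : (List.replicate m c).length = m := List.length_replicate
      rw [hlen]
      exact ih t' cnt (pvCondSet r c tot) (tot + (m : Int)) hd'
        (hts.sublist List.filter_sublist)
        (by
          intro x
          constructor
          · intro hx
            have hxt : x ∈ t := (hmem x).mp (List.mem_cons_of_mem c hx)
            refine List.mem_filter.mpr ⟨hxt, ?_⟩
            have : x ≠ c := ne_of_gt (hcd x hx)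
            simpa using this
          · intro hx
            have hxt : x ∈ t := List.mem_of_mem_filter hx
            rcases List.mem_cons.mp ((hmem x).mpr hxt) with rfl | h
            · exact absurd rfl (hnotc x hx)
            · exact h)
        (fun x hx => hbound x (List.mem_of_mem_filter hx))
        (by
          intro x hx
          rw [hcnt x (List.mem_cons_of_mem _ hx), hcount' x (ne_of_gt (hcd x hx))])
        (by rw [pvCondSet_length, hr])

-- index-loop-with-lookup form of a fold over enumerate
lemma pvEnumFold {σ : Type} (xs : List Char) (f : σ → Int × Char → σ) (init : σ) :
    (PySem.List.pyRange 0 (xs.length : Int) 1).foldl (fun s i => f s (i, PySem.List.pyGetD xs i ' ')) init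
      = (PySem.List.enumerate xs).foldl f init := by
  rw [PySem.List.enumerate_eq_map_pyRange xs ' ', List.foldl_map]
  simp [PySem.List.len_eq]

-- Dom gives the code bound each character needs
lemma pvCharBound (s : String) (h : Dom_compute_rank s) : ∀ c ∈ s.toList, c.toNat ≤ 126 := by
  intro c hc
  unfold Dom_compute_rank pvDomStr at h
  have := List.all_eq_true.mp h c hc
  unfold pvDomChar at this
  simp only [Bool.or_eq_true, Bool.and_eq_true, decide_eq_true_eq, beq_iff_eq] at this
  omega

-- named pieces of the two ports' folds (proof-only)
def pvInit0 (n : Nat) : List Int × List (List Int) :=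
  (List.replicate 91 (0 : Int), List.replicate 91 (List.replicate n (0 : Int)))

def pvRankFold (ss : List Char) (n : Nat) : List (Option Int) :=
  (PySem.List.pyRange 0 (n : Int) 1).foldl
    (fun r i => pvRStep r (i, PySem.List.pyGetD ss i ' ')) (List.replicate 91 (none : Option Int))

def pvCOFold (cs : List Char) (n : Nat) : List Int × List (List Int) :=
  (PySem.List.pyRange 0 (n : Int) 1).foldl
    (fun co i => pvCOStep co (i, PySem.List.pyGetD cs i ' ')) (pvInit0 n)

-- A's single loop over a product state splits into its two independent component loops
lemma pvA_eq (s : String) :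
    compute_rank s
      = ((pvCOFold s.toList s.toList.length).2,
         pvRankFold (PySem.List.sorted s.toList (fun c => c)) s.toList.length) := by
  have h0 : compute_rank s
      = ((List.foldl
            (fun (st : List (Option Int) × (List Int × List (List Int))) (e : Int) =>
              ((fun r i => pvRStep r (i, PySem.List.pyGetD (PySem.List.sorted s.toList (fun c => c)) i ' ')) st.1 e,
               (fun co i => pvCOStep co (i, PySem.List.pyGetD s.toList i ' ')) st.2 e))
            (List.replicate 91 (none : Option Int), pvInit0 s.toList.length)
            (PySem.List.pyRange 0 (s.toList.length : Int) 1)).2.2,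
         (List.foldl
            (fun (st : List (Option Int) × (List Int × List (List Int))) (e : Int) =>
              ((fun r i => pvRStep r (i, PySem.List.pyGetD (PySem.List.sorted s.toList (fun c => c)) i ' ')) st.1 e,
               (fun co i => pvCOStep co (i, PySem.List.pyGetD s.toList i ' ')) st.2 e))
            (List.replicate 91 (none : Option Int), pvInit0 s.toList.length)
            (PySem.List.pyRange 0 (s.toList.length : Int) 1)).1) := rfl
  rw [h0, PySem.List.foldl_prod_mk
      (fun r i => pvRStep r (i, PySem.List.pyGetD (PySem.List.sorted s.toList (fun c => c)) i ' '))
      (fun co i => pvCOStep co (i, PySem.List.pyGetD s.toList i ' '))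
      (PySem.List.pyRange 0 (s.toList.length : Int) 1)
      (List.replicate 91 (none : Option Int)) (pvInit0 s.toList.length)]
  rfl

lemma pvB_eq (s : String) :
    compute_rank_alt s
      = (((PySem.List.enumerate s.toList).foldl pvCOStep (pvInit0 s.toList.length)).2,
         ((PySem.List.sorted (PySem.Set.ofList s.toList) (fun c => c)).foldl
            (pvBStep (fun ch => (PySem.List.count s.toList ch : Int)))
            (List.replicate 91 (none : Option Int), 0)).1) := rfl

-- ===== VERDICT (by name: the statement is the Claim_ definition above) =====
theorem compute_rank_spec : Claim_equal_compute_rank := by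
  intro s hdom
  unfold Spec_compute_rank
  rw [pvA_eq s, pvB_eq s]
  have hco : pvCOFold s.toList s.toList.length
      = (PySem.List.enumerate s.toList).foldl pvCOStep (pvInit0 s.toList.length) :=
    pvEnumFold s.toList pvCOStep (pvInit0 s.toList.length)
  have hmem : ∀ x, x ∈ PySem.List.sorted (PySem.Set.ofList s.toList) (fun c => c)
      ↔ x ∈ PySem.List.sorted s.toList (fun c => c) := by
    intro x
    rw [PySem.List.mem_sorted, PySem.List.mem_sorted, PySem.Set.mem_ofList]
  have hbound : ∀ x ∈ PySem.List.sorted s.toList (fun c => c), x.toNat ≤ 126 := by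
    intro x hx
    exact pvCharBound s hdom x ((PySem.List.mem_sorted _ _ _ x).mp hx)
  have hcnt : ∀ x ∈ PySem.List.sorted (PySem.Set.ofList s.toList) (fun c => c),
      (fun ch => (PySem.List.count s.toList ch : Int)) x
        = (List.count x (PySem.List.sorted s.toList (fun c => c)) : Int) := by
    intro x _
    show (PySem.List.count s.toList x : Int)
        = (List.count x (PySem.List.sorted s.toList (fun c => c)) : Int)
    rw [PySem.List.count_eq]
    exact_mod_cast ((PySem.List.sorted_perm s.toList (fun c => c) false).count_eq x).symm
  have hrank : pvRankFold (PySem.List.sorted s.toList (fun c => c)) s.toList.length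
      = ((PySem.List.sorted (PySem.Set.ofList s.toList) (fun c => c)).foldl
            (pvBStep (fun ch => (PySem.List.count s.toList ch : Int)))
            (List.replicate 91 (none : Option Int), 0)).1 := by
    unfold pvRankFold
    have hlen : (PySem.List.sorted s.toList (fun c => c)).length = s.toList.length :=
      PySem.List.length_sorted _ _ _
    rw [← hlen,
        pvEnumFold (PySem.List.sorted s.toList (fun c => c)) pvRStep (List.replicate 91 (none : Option Int))]
    exact pvMainL _ _ _ _ 0 (PySem.List.sorted_ofList_pairwise_lt s.toList)
      (PySem.List.sorted_pairwise s.toList (fun c => c)) hmem hbound hcnt List.length_replicate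
  rw [hco, hrank]
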